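-- pv_equiv track=rewrite | github.com/kenhuangus/ai-news-aggregator | processors/llm_analyzer.py | _simple_categorize
-- ===== SOURCE A (Python) =====
-- from typing import List, Dict, Any, Optional
--
-- def _simple_categorize(item: Dict[str, Any]) -> str:
--     """Simple keyword-based categorization fallback."""
--     text = f"{item.get('title', '')} {item.get('content', '')}".lower()
--
--     if any(word in text for word in ['paper', 'research', 'arxiv', 'study', 'findings']):
--         return "Research & Papers"
--     elif any(word in text for word in ['company', 'funding', 'acquisition', 'partnership', 'business']):
--         return "Industry & Business"
--     elif any(word in text for word in ['release', 'launch', 'tool', 'product', 'app', 'platform']):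
--         return "Products & Tools"
--     elif any(word in text for word in ['model', 'gpt', 'llm', 'benchmark', 'evaluation']):
--         return "Models & Benchmarks"
--     elif any(word in text for word in ['regulation', 'policy', 'ethics', 'safety', 'governance']):
--         return "Policy & Ethics"
--     elif any(word in text for word in ['application', 'use case', 'deployment', 'implementation']):
--         return "Applications"
--     elif any(word in text for word in ['infrastructure', 'hardware', 'gpu', 'compute', 'cloud']):
--         return "Infrastructure"
--     else:
--         return "Other"
-- ===== SOURCE B (Python) =====
-- CATEGORIES = [
--     (['paper', 'research', 'arxiv', 'study', 'findings'], "Research & Papers"),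
--     (['company', 'funding', 'acquisition', 'partnership', 'business'], "Industry & Business"),
--     (['release', 'launch', 'tool', 'product', 'app', 'platform'], "Products & Tools"),
--     (['model', 'gpt', 'llm', 'benchmark', 'evaluation'], "Models & Benchmarks"),
--     (['regulation', 'policy', 'ethics', 'safety', 'governance'], "Policy & Ethics"),
--     (['application', 'use case', 'deployment', 'implementation'], "Applications"),
--     (['infrastructure', 'hardware', 'gpu', 'compute', 'cloud'], "Infrastructure"),
-- ]
--
-- # flat keyword index: every keyword with the priority rank of its category
-- KEYWORDS = [(w, i, name) for i, (ws, name) in enumerate(CATEGORIES) for w in ws]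
--
-- def _simple_categorize(item):
--     text = f"{item.get('title', '')} {item.get('content', '')}".lower()
--     best = None
--     for word, rank, name in KEYWORDS:
--         if word in text and (best is None or rank < best[0]):
--             best = (rank, name)
--     return best[1] if best is not None else "Other"
-- ===== Notes on version B (the rewrite author's own statement) =====
-- stated objective: alternative
-- what changed: B flattens all keywords into one (keyword, rank, category) list and makes a single full pass tracking the minimum-rank matching keyword, instead of A's seven-way priority if/elif chain with early return per category group.
import Mathlib
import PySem

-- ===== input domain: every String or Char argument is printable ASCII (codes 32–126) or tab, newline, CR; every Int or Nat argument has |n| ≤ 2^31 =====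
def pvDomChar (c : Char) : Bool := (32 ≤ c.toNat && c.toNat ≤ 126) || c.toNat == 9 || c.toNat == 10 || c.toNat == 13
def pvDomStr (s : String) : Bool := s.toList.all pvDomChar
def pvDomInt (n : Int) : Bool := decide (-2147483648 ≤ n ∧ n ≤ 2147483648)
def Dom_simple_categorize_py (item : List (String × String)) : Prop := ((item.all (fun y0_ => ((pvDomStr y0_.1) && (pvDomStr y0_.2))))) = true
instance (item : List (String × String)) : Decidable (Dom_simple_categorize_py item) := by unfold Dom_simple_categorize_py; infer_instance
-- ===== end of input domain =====

-- B replaces A's seven-way if/elif priority chain by one full pass over a flat (keyword, rank, category) list tracking the minimum-rank match (objective: alternative).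


-- ===== PORT A =====
def simple_categorize_py (item : List (String × String)) : String :=
  let t := (PySem.Dict.mk item).getD "title" ""
  let c := (PySem.Dict.mk item).getD "content" ""
  let text := PySem.Str.lower (String.mk (t.toList ++ ' ' :: c.toList))
  if ["paper", "research", "arxiv", "study", "findings"].any (fun w => PySem.Str.isIn w text) then
    "Research & Papers"
  else if ["company", "funding", "acquisition", "partnership", "business"].any (fun w => PySem.Str.isIn w text) then
    "Industry & Business"
  else if ["release", "launch", "tool", "product", "app", "platform"].any (fun w => PySem.Str.isIn w text) then
    "Products & Tools"
  else if ["model", "gpt", "llm", "benchmark", "evaluation"].any (fun w => PySem.Str.isIn w text) then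
    "Models & Benchmarks"
  else if ["regulation", "policy", "ethics", "safety", "governance"].any (fun w => PySem.Str.isIn w text) then
    "Policy & Ethics"
  else if ["application", "use case", "deployment", "implementation"].any (fun w => PySem.Str.isIn w text) then
    "Applications"
  else if ["infrastructure", "hardware", "gpu", "compute", "cloud"].any (fun w => PySem.Str.isIn w text) then
    "Infrastructure"
  else
    "Other"

-- ===== PORT B =====
def pvCategoriesB : List (List String × String) :=
  [ (["paper", "research", "arxiv", "study", "findings"], "Research & Papers"),
    (["company", "funding", "acquisition", "partnership", "business"], "Industry & Business"),
    (["release", "launch", "tool", "product", "app", "platform"], "Products & Tools"),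
    (["model", "gpt", "llm", "benchmark", "evaluation"], "Models & Benchmarks"),
    (["regulation", "policy", "ethics", "safety", "governance"], "Policy & Ethics"),
    (["application", "use case", "deployment", "implementation"], "Applications"),
    (["infrastructure", "hardware", "gpu", "compute", "cloud"], "Infrastructure") ]

-- the comprehension '[(w, i, name) for i, (ws, name) in enumerate(CATEGORIES) for w in ws]'
def pvFlatten : Nat → List (List String × String) → List (String × Nat × String)
  | _, [] => []
  | k, (ws, n) :: rest => ws.map (fun w => (w, k, n)) ++ pvFlatten (k + 1) rest

def pvKeywords : List (String × Nat × String) := pvFlatten 0 pvCategoriesB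

-- one iteration of B's loop: 'if word in text and (best is None or rank < best[0]): best = (rank, name)'
def pvStep (text : String) (best : Option (Nat × String)) (e : String × Nat × String) :
    Option (Nat × String) :=
  match best with
  | none => if PySem.Str.isIn e.1 text then some (e.2.1, e.2.2) else none
  | some (r, n) =>
      if PySem.Str.isIn e.1 text && decide (e.2.1 < r) then some (e.2.1, e.2.2) else some (r, n)

def simple_categorize_py_alt (item : List (String × String)) : String :=
  let t := (PySem.Dict.mk item).getD "title" ""
  let c := (PySem.Dict.mk item).getD "content" ""
  let text := PySem.Str.lower (String.mk (t.toList ++ ' ' :: c.toList))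
  match pvKeywords.foldl (pvStep text) none with
  | some (_, n) => n
  | none => "Other"

-- ===== PRECONDITION & SPEC =====
def Spec_simple_categorize_py (item : List (String × String)) (out : String) : Prop := out = simple_categorize_py_alt item
instance (item : List (String × String)) (out : String) : Decidable (Spec_simple_categorize_py item out) := by unfold Spec_simple_categorize_py; infer_instance

-- ===== CLAIM (what is proved, stated in full; the proofs are below) =====
def Claim_equal_simple_categorize_py : Prop := ∀ (item : List (String × String)), Dom_simple_categorize_py item → Spec_simple_categorize_py item (simple_categorize_py item)

-- ===== LEMMAS AND PROOFS =====

-- the first-matching-category reading of the table, used only in the proof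
def pvFirstOpt (text : String) : Nat → List (List String × String) → Option (Nat × String)
  | _, [] => none
  | k, (ws, n) :: rest =>
      if ws.any (fun w => PySem.Str.isIn w text) then some (k, n) else pvFirstOpt text (k + 1) rest

theorem pvFlatten_rank_ge (cats : List (List String × String)) :
    ∀ k e, e ∈ pvFlatten k cats → k ≤ e.2.1 := by
  induction cats with
  | nil => intro k e h; simp [pvFlatten] at h
  | cons p rest ih =>
      intro k e h
      obtain ⟨ws, n⟩ := p
      simp only [pvFlatten, List.mem_append, List.mem_map] at h
      rcases h with ⟨w, _, rfl⟩ | h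
      · exact le_refl k
      · exact Nat.le_of_succ_le (ih (k + 1) e h)

theorem pvFold_stuck (text : String) (l : List (String × Nat × String)) :
    ∀ r n, (∀ e ∈ l, r ≤ e.2.1) → l.foldl (pvStep text) (some (r, n)) = some (r, n) := by
  induction l with
  | nil => intro r n _; rfl
  | cons e rest ih =>
      intro r n h
      have hr : r ≤ e.2.1 := h e (List.mem_cons_self ..)
      have : pvStep text (some (r, n)) e = some (r, n) := by
        simp only [pvStep]
        have : ¬ e.2.1 < r := Nat.not_lt.mpr hr
        simp [this]
      rw [List.foldl_cons, this]
      exact ih r n (fun e' he' => h e' (List.mem_cons_of_mem _ he'))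

theorem pvFold_group (text : String) (ws : List String) :
    ∀ k n, (ws.map (fun w => (w, k, n))).foldl (pvStep text) none =
      if ws.any (fun w => PySem.Str.isIn w text) then some (k, n) else none := by
  induction ws with
  | nil => intro k n; rfl
  | cons w rest ih =>
      intro k n
      rw [List.map_cons, List.foldl_cons, List.any_cons]
      by_cases h : PySem.Str.isIn w text = true
      · have hstep : pvStep text none (w, k, n) = some (k, n) := by
          simp only [pvStep]; exact if_pos h
        have hrest : (rest.map (fun w => (w, k, n))).foldl (pvStep text) (some (k, n)) = some (k, n) := by
          apply pvFold_stuck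
          intro e he
          obtain ⟨w', _, rfl⟩ := List.mem_map.mp he
          exact le_refl k
        rw [hstep, hrest, h, Bool.true_or]; rfl
      · have hb : PySem.Str.isIn w text = false := Bool.eq_false_iff.mpr h
        have hstep : pvStep text none (w, k, n) = none := by
          simp only [pvStep]; exact if_neg h
        rw [hstep, ih k n, hb, Bool.false_or]

theorem pvFold_flatten (text : String) (cats : List (List String × String)) :
    ∀ k, (pvFlatten k cats).foldl (pvStep text) none = pvFirstOpt text k cats := by
  induction cats with
  | nil => intro k; rfl
  | cons p rest ih =>
      intro k
      obtain ⟨ws, n⟩ := p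
      simp only [pvFlatten, pvFirstOpt, List.foldl_append]
      rw [pvFold_group text ws k n]
      by_cases h : (ws.any (fun w => PySem.Str.isIn w text)) = true
      · rw [if_pos h, if_pos h]
        exact pvFold_stuck text _ k n
          (fun e he => Nat.le_of_succ_le (pvFlatten_rank_ge rest (k + 1) e he))
      · rw [if_neg h, if_neg h, ih (k + 1)]

-- ===== VERDICT (by name: the statement is the Claim_ definition above) =====
set_option maxHeartbeats 1600000 in
theorem simple_categorize_py_spec : Claim_equal_simple_categorize_py := by
  intro item _
  unfold Spec_simple_categorize_py simple_categorize_py simple_categorize_py_alt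
  simp only [pvKeywords, pvFold_flatten, pvCategoriesB, pvFirstOpt]
  split_ifs <;> rfl
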